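-- pv_equiv track=rewrite | github.com/broadinstitute/broad-nnfc-hiPSC-to-EC | analyses/02-2025-10-21_align_guides/filter_alignments_with_logs.py | map_query_subspan_to_reference
-- ===== SOURCE A (Python) =====
-- from typing import List, Tuple, Optional, Dict, Set, Union
--
-- def map_query_subspan_to_reference(
--     query_to_ref_map: List[Optional[int]],
--     query_start: int,
--     query_end: int
-- ) -> Optional[Tuple[int, int]]:
--     """
--     Map a query subsequence to reference coordinates.
--
--     Args:
--         query_to_ref_map: Mapping from query to reference positions
--         query_start: Start of query region (inclusive)
--         query_end: End of query region (exclusive)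
--
--     Returns:
--         Tuple of (ref_start, ref_end) in 0-based half-open coords, or None if invalid
--     """
--     if not query_to_ref_map or query_start >= query_end:
--         return None
--
--     # Find first aligned position in range
--     ref_start = None
--     for i in range(query_start, min(query_end, len(query_to_ref_map))):
--         if query_to_ref_map[i] is not None:
--             ref_start = query_to_ref_map[i]
--             break
--
--     # Find last aligned position in range
--     ref_end = None
--     for i in range(min(query_end - 1, len(query_to_ref_map) - 1), query_start - 1, -1):
--         if query_to_ref_map[i] is not None:
--             ref_end = query_to_ref_map[i] + 1
--             break
--
--     if ref_start is not None and ref_end is not None and ref_end > ref_start: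
--         return ref_start, ref_end
--     return None
-- ===== SOURCE B (Python) =====
-- def map_query_subspan_to_reference(query_to_ref_map, query_start, query_end):
--     if not query_to_ref_map or query_start >= query_end:
--         return None
--     vals = [query_to_ref_map[i]
--             for i in range(query_start, min(query_end, len(query_to_ref_map)))
--             if query_to_ref_map[i] is not None]
--     if vals and vals[-1] + 1 > vals[0]:
--         return vals[0], vals[-1] + 1
--     return None
-- ===== Notes on version B (the rewrite author's own statement) =====
-- stated objective: simpler
-- what changed: Replaces A's two directional early-break scans (forward for the first aligned value, backward for the last) with a single forward comprehension collecting aligned values, then reads its first and last element.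
import Mathlib
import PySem

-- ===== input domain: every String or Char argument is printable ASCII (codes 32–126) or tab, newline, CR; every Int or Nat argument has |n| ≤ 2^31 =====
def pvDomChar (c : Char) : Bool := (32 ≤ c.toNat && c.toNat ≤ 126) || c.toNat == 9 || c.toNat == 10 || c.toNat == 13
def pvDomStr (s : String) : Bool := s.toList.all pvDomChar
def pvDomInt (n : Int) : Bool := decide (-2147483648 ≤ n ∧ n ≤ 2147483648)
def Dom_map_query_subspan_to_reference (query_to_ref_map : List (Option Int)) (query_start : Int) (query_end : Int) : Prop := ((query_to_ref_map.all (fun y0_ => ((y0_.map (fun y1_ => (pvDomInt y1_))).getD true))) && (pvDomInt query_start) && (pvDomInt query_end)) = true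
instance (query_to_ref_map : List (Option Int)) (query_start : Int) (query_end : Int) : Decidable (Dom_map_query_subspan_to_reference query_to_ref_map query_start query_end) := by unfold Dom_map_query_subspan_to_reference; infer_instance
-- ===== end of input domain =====

-- B replaces A's two directional early-break scans with one forward comprehension of the
-- aligned values, reading its first and last element (objective: simpler).

-- ===== PORT A =====
-- first loop / second loop of A: scan the index list, return the first aligned value
-- (some none = position unaligned, keep scanning; pyGet? = none would be Python's
-- IndexError, excluded by Pre_; the port returns none there).
def pvFindA (m : List (Option Int)) : List Int → Option Int
  | [] => none
  | i :: rest =>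
    match PySem.List.pyGet? m i with
    | some (some v) => some v
    | some none => pvFindA m rest
    | none => none

def map_query_subspan_to_reference (query_to_ref_map : List (Option Int)) (query_start : Int) (query_end : Int) : Option (Int × Int) :=
  if query_to_ref_map.length = 0 ∨ query_start ≥ query_end then none
  else
    let ref_start := pvFindA query_to_ref_map (PySem.List.pyRange query_start (min query_end (query_to_ref_map.length : Int)) 1)
    let ref_end := (pvFindA query_to_ref_map (PySem.List.pyRange (min (query_end - 1) ((query_to_ref_map.length : Int) - 1)) (query_start - 1) (-1))).map (· + 1)
    match ref_start, ref_end with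
    | some s, some e => if e > s then some (s, e) else none
    | _, _ => none

-- ===== PORT B =====
def map_query_subspan_to_reference_alt (query_to_ref_map : List (Option Int)) (query_start : Int) (query_end : Int) : Option (Int × Int) :=
  if query_to_ref_map.length = 0 ∨ query_start ≥ query_end then none
  else
    let vals := (PySem.List.pyRange query_start (min query_end (query_to_ref_map.length : Int)) 1).filterMap
      (fun i => (PySem.List.pyGet? query_to_ref_map i).join)
    if h : vals = [] then none
    else if vals.getLast h + 1 > vals.head h then some (vals.head h, vals.getLast h + 1)
    else none

-- ===== PRECONDITION & SPEC =====
-- Pre_ excludes exactly the inputs on which A raises IndexError (negative start index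
-- beyond -len reached by the loops); A returns normally everywhere else.
def Pre_map_query_subspan_to_reference (query_to_ref_map : List (Option Int)) (query_start : Int) (query_end : Int) : Prop :=
  ¬ (query_to_ref_map ≠ [] ∧ query_start < query_end ∧ query_start < (query_to_ref_map.length : Int) ∧ query_start < -(query_to_ref_map.length : Int))
instance (query_to_ref_map : List (Option Int)) (query_start : Int) (query_end : Int) : Decidable (Pre_map_query_subspan_to_reference query_to_ref_map query_start query_end) := by unfold Pre_map_query_subspan_to_reference; infer_instance

def pvWitness_map_query_subspan_to_reference : List (Option Int) × Int × Int := ([none, some 3, some 7, none], 1, 4)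

def Spec_map_query_subspan_to_reference (query_to_ref_map : List (Option Int)) (query_start : Int) (query_end : Int) (out : Option (Int × Int)) : Prop := out = map_query_subspan_to_reference_alt query_to_ref_map query_start query_end
instance (query_to_ref_map : List (Option Int)) (query_start : Int) (query_end : Int) (out : Option (Int × Int)) : Decidable (Spec_map_query_subspan_to_reference query_to_ref_map query_start query_end out) := by unfold Spec_map_query_subspan_to_reference; infer_instance

-- ===== CLAIM (what is proved, stated in full; the proofs are below) =====
def Claim_equal_map_query_subspan_to_reference : Prop := ∀ (query_to_ref_map : List (Option Int)) (query_start : Int) (query_end : Int), Dom_map_query_subspan_to_reference query_to_ref_map query_start query_end → Pre_map_query_subspan_to_reference query_to_ref_map query_start query_end → Spec_map_query_subspan_to_reference query_to_ref_map query_start query_end (map_query_subspan_to_reference query_to_ref_map query_start query_end)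

-- ===== LEMMAS AND PROOFS =====

-- When every index in the list is in range, A's forward scan equals the head of B's filtered list.
theorem pvFindA_eq_head (m : List (Option Int)) (l : List Int)
    (h : ∀ i ∈ l, (PySem.List.pyGet? m i).isSome) :
    pvFindA m l = (l.filterMap (fun i => (PySem.List.pyGet? m i).join)).head? := by
  induction l with
  | nil => rfl
  | cons i rest ih =>
    have hi := h i (List.mem_cons_self ..)
    have hrest := fun j hj => h j (List.mem_cons_of_mem _ hj)
    cases hg : PySem.List.pyGet? m i with
    | none => simp [hg] at hi
    | some o =>
      cases o with
      | none => simpa [pvFindA, hg, List.filterMap_cons, Option.join] using ih hrest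
      | some v => simp [pvFindA, hg, Option.join]

theorem pvFindA_reverse_eq_getLast (m : List (Option Int)) (l : List Int)
    (h : ∀ i ∈ l, (PySem.List.pyGet? m i).isSome) :
    pvFindA m l.reverse = (l.filterMap (fun i => (PySem.List.pyGet? m i).join)).getLast? := by
  rw [pvFindA_eq_head m l.reverse (by simpa using h), List.filterMap_reverse,
    List.head?_reverse]

-- ===== VERDICT (by name: the statement is the Claim_ definition above) =====
theorem map_query_subspan_to_reference_spec : Claim_equal_map_query_subspan_to_reference := by
  intro m qs qe _ hpre
  unfold Spec_map_query_subspan_to_reference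
  unfold map_query_subspan_to_reference map_query_subspan_to_reference_alt
  by_cases hguard : m.length = 0 ∨ qs ≥ qe
  · rw [if_pos hguard, if_pos hguard]
  · rw [if_neg hguard, if_neg hguard]
    obtain ⟨hm, hge⟩ := not_or.mp hguard
    have hlt : qs < qe := lt_of_not_ge hge
    have hmlen : 0 < (m.length : Int) := by exact_mod_cast Nat.pos_of_ne_zero hm
    -- the backward range is the reverse of the forward range
    have hmin : min (qe - 1) ((m.length : Int) - 1) = min qe (m.length : Int) - 1 := by omega
    have hrev : PySem.List.pyRange (min (qe - 1) ((m.length : Int) - 1)) (qs - 1) (-1)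
        = (PySem.List.pyRange qs (min qe (m.length : Int)) 1).reverse := by
      rw [hmin, PySem.List.pyRange_neg_one_eq_reverse,
        show qs - 1 + 1 = qs from by ring,
        show min qe (m.length : Int) - 1 + 1 = min qe (m.length : Int) from by ring]
    by_cases hq : qs < (m.length : Int)
    · have hqs : -(m.length : Int) ≤ qs := by
        by_contra hc
        apply hpre
        refine ⟨fun hnil => hm (by rw [hnil]; rfl), hlt, hq, by omega⟩
      have hin : ∀ i ∈ PySem.List.pyRange qs (min qe (m.length : Int)) 1,
          (PySem.List.pyGet? m i).isSome := by
        intro i hi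
        rw [PySem.List.mem_pyRange_one] at hi
        rw [Option.isSome_iff_ne_none]
        simp only [ne_eq, PySem.List.pyGet?_eq_none_iff, PySem.Raise.InRange, not_not]
        omega
      rw [hrev, pvFindA_eq_head m _ hin, pvFindA_reverse_eq_getLast m _ hin]
      rcases hL : (List.filterMap (fun i => (PySem.List.pyGet? m i).join)
          (PySem.List.pyRange qs (min qe (m.length : Int)) 1)) with _ | ⟨a, rest⟩
      · simp
      · have hb : (a :: rest).getLast? = some ((a :: rest).getLast (List.cons_ne_nil a rest)) :=
          List.getLast?_eq_some_getLast _
        simp [hb]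
    · -- qs ≥ len: both ranges empty, both return none
      have h1 : PySem.List.pyRange qs (min qe (m.length : Int)) 1 = [] :=
        PySem.List.pyRange_one_eq_nil (by omega)
      rw [hrev, h1]
      simp [pvFindA]
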